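-- pv_equiv track=rewrite | github.com/GustavoPinto070/L_solutions | L06/ex6.py | num_para_seq_cod
-- ===== SOURCE A (Python) =====
-- def num_para_seq_cod(n:int)->tuple:
--     resultado = ()
--     while n > 0:
--         ultimo_digito = n % 10      # retrieve last digit
--         n //= 10                    # remove last digit
--         if ultimo_digito % 2 == 0:  # se par
--             ultimo_digito += 2      # próx. par
--         else:                       # se ímpar
--             ultimo_digito -= 2      # ímpar anterior
--         ultimo_digito %= 10         # -1 into 9 and 10 into 0
--         resultado += (ultimo_digito,)
--     return resultado[::-1]
-- ===== SOURCE B (Python) =====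
-- def num_para_seq_cod(n: int) -> tuple:
--     if n <= 0:
--         return ()
--     return tuple((d + 2 if d % 2 == 0 else d - 2) % 10 for d in map(int, str(n)))
-- ===== Notes on version B (the rewrite author's own statement) =====
-- stated objective: idiomatic
-- what changed: B guards the non-positive case, then maps the parity transform over the decimal string str(n) most-significant-first in one generator expression, replacing A's arithmetic digit-peeling loop that accumulates least-significant-first and then reverses.
import Mathlib
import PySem

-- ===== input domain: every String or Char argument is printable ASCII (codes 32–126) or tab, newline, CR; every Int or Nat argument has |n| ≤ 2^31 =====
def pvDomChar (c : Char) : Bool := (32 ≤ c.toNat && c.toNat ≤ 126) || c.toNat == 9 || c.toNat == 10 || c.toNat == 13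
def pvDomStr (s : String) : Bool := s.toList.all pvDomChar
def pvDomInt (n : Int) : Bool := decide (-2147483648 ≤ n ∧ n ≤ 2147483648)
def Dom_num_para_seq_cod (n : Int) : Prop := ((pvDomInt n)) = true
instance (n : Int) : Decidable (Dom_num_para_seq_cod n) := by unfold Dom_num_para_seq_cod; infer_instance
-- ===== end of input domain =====

-- B replaces A's digit-peeling loop + final reversal with an idiomatic guard-then-map
-- over the decimal string str(n), most-significant digit first (same cost, no reversal).


-- ===== PORT A =====
-- the 'while n > 0' loop: peel the last digit, transform it, append to resultado
def numParaLoop (n : Int) (resultado : List Int) : List Int :=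
  if h : 0 < n then
    let ultimo_digito := PySem.Int.mod n 10
    let n' := PySem.Int.floordiv n 10
    let ultimo_digito2 := if PySem.Int.mod ultimo_digito 2 = 0 then ultimo_digito + 2 else ultimo_digito - 2
    numParaLoop n' (resultado ++ [PySem.Int.mod ultimo_digito2 10])
  else resultado
termination_by n.toNat
decreasing_by
  have : PySem.Int.floordiv n 10 = n / 10 := PySem.Int.floordiv_eq_ediv_of_pos (by omega)
  simp only [this]; omega

def num_para_seq_cod (n : Int) : List Int :=
  -- resultado[::-1] is List.reverse (PySem.List.slice?_none_none_neg_one)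
  (numParaLoop n []).reverse

-- ===== PORT B =====
def num_para_seq_cod_alt (n : Int) : List Int :=
  if n ≤ 0 then []
  else
    (PySem.Int.toChars n).map (fun c =>
      -- d = int(c): exact here, since str(n) for n > 0 consists of digit chars '0'-'9'
      let d : Int := (c.toNat : Int) - 48
      PySem.Int.mod (if PySem.Int.mod d 2 = 0 then d + 2 else d - 2) 10)

-- ===== PRECONDITION & SPEC =====
def Spec_num_para_seq_cod (n : Int) (out : List Int) : Prop := out = num_para_seq_cod_alt n
instance (n : Int) (out : List Int) : Decidable (Spec_num_para_seq_cod n out) := by unfold Spec_num_para_seq_cod; infer_instance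

-- ===== CLAIM (what is proved, stated in full; the proofs are below) =====
def Claim_equal_num_para_seq_cod : Prop := ∀ (n : Int), Dom_num_para_seq_cod n → Spec_num_para_seq_cod n (num_para_seq_cod n)

-- ===== LEMMAS AND PROOFS =====

-- the common per-digit transform, on a digit value d
def pvT (d : Int) : Int := PySem.Int.mod (if PySem.Int.mod d 2 = 0 then d + 2 else d - 2) 10

-- A's loop collects the transformed base-10 digits, least significant first
lemma numParaLoop_eq (m : Nat) (acc : List Int) :
    numParaLoop (m : Int) acc = acc ++ (Nat.digits 10 m).map (fun d : Nat => pvT (d : Int)) := by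
  induction m using Nat.strong_induction_on generalizing acc with
  | _ m ih =>
    rw [numParaLoop]
    by_cases hm : 0 < m
    · have h0 : (0 : Int) < (m : Int) := by exact_mod_cast hm
      rw [dif_pos h0]
      have hmod : PySem.Int.mod (m : Int) 10 = ((m % 10 : Nat) : Int) := by
        exact_mod_cast PySem.Int.mod_natCast m 10
      have hdiv : PySem.Int.floordiv (m : Int) 10 = ((m / 10 : Nat) : Int) := by
        exact_mod_cast PySem.Int.floordiv_natCast m 10
      rw [hmod, hdiv, ih (m / 10) (Nat.div_lt_self hm (by norm_num))]
      rw [Nat.digits_def' (by norm_num : 1 < 10) hm]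
      simp [pvT, List.append_assoc]
      split_ifs <;> omega
    · have hm0 : m = 0 := by omega
      subst hm0
      simp

-- toDigitsCore writes the base-10 digits, most significant first (n > 0, enough fuel)
lemma toDigitsCore_eq_digits (n : Nat) (hn : 0 < n) :
    ∀ (fuel : Nat) (ds : List Char), n < fuel →
      Nat.toDigitsCore 10 fuel n ds = ((Nat.digits 10 n).map Nat.digitChar).reverse ++ ds := by
  induction n using Nat.strong_induction_on with
  | _ n ih =>
    intro fuel ds hfuel
    match fuel with
    | 0 => omega
    | f + 1 =>
      simp only [Nat.toDigitsCore]
      rw [Nat.digits_def' (by norm_num : 1 < 10) hn]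
      by_cases hq : n / 10 = 0
      · rw [if_pos hq, hq]
        simp
      · rw [if_neg hq]
        have hlt : n / 10 < n := Nat.div_lt_self hn (by norm_num)
        rw [ih (n / 10) hlt (Nat.pos_of_ne_zero hq) f (Nat.digitChar (n % 10) :: ds) (by omega)]
        rw [Nat.digits_def' (by norm_num : 1 < 10) (Nat.pos_of_ne_zero hq)]
        simp

lemma toChars_pos (n : Int) (hn : 0 < n) :
    PySem.Int.toChars n = ((Nat.digits 10 n.toNat).map Nat.digitChar).reverse := by
  rw [PySem.Int.toChars, if_neg (by omega), Nat.toDigits]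
  simpa using toDigitsCore_eq_digits n.toNat (by omega) (n.toNat + 1) [] (by omega)

-- the per-digit transform applied to a digit character recovers pvT
lemma pvT_digitChar (d : Nat) (hd : d < 10) :
    ((fun c => PySem.Int.mod (if PySem.Int.mod ((c.toNat : Int) - 48) 2 = 0
        then (c.toNat : Int) - 48 + 2 else (c.toNat : Int) - 48 - 2) 10) (Nat.digitChar d))
      = pvT (d : Int) := by
  interval_cases d <;> decide

-- ===== VERDICT (by name: the statement is the Claim_ definition above) =====
theorem num_para_seq_cod_spec : Claim_equal_num_para_seq_cod := by
  intro n _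
  unfold Spec_num_para_seq_cod num_para_seq_cod num_para_seq_cod_alt
  by_cases hn : n ≤ 0
  · rw [if_pos hn, numParaLoop, dif_neg (by omega)]
    simp
  · rw [if_neg hn]
    rw [not_le] at hn
    have hcast : n = ((n.toNat : Nat) : Int) := by omega
    rw [hcast, numParaLoop_eq n.toNat [], ← hcast, toChars_pos n hn]
    simp only [List.map_reverse, List.map_map, List.nil_append]
    congr 1
    apply List.map_congr_left
    intro d hd
    simpa using (pvT_digitChar d (Nat.digits_lt_base (by norm_num) hd)).symm
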